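-- pv_equiv track=rewrite | github.com/sitanatarajan2006/CPS4003-Programming-Project | data_processor.py | unique_categories
-- ===== SOURCE A (Python) =====
-- def clean_data(data):
--
--     clean = {}
--
--     for row in data:
--         video_id = row["video_id"]
--
--         if video_id not in clean:
--             clean[video_id] = row
--         else:
--             if row["trending_date"] > clean[video_id]["trending_date"]:
--                 clean[video_id] = row
--     return list(clean.values())
--
-- def unique_categories(data):
--
--     clean = clean_data(data)
--
--     category_count = {}
--     for row in clean:
--         category = row["category_id"]
--         if category not in category_count:
--             category_count[category] = 1
--         else:
--             category_count[category] += 1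
--     return category_count
-- ===== SOURCE B (Python) =====
-- def unique_categories(data):
--     groups = {}
--     for row in data:
--         groups.setdefault(row["video_id"], []).append(row)
--     counts = {}
--     for rows in groups.values():
--         best = max(rows, key=lambda r: r["trending_date"])
--         cat = best["category_id"]
--         counts[cat] = counts.get(cat, 0) + 1
--     return counts
-- ===== Notes on version B (the rewrite author's own statement) =====
-- stated objective: alternative
-- what changed: Replaces A's incremental dict-of-best-rows (running max with strict '>' per video) plus a second conditional counting pass by grouping all rows per video_id once, taking max(rows, key=trending_date) per group (first maximal element, same tie-break), and counting with dict.get(cat, 0)+1.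
-- outside the precondition, e.g. on unique_categories([{'video_id': 'a', 'category_id': 'c'}]): A returns {'c': 1}, B raises KeyError
import Mathlib
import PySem

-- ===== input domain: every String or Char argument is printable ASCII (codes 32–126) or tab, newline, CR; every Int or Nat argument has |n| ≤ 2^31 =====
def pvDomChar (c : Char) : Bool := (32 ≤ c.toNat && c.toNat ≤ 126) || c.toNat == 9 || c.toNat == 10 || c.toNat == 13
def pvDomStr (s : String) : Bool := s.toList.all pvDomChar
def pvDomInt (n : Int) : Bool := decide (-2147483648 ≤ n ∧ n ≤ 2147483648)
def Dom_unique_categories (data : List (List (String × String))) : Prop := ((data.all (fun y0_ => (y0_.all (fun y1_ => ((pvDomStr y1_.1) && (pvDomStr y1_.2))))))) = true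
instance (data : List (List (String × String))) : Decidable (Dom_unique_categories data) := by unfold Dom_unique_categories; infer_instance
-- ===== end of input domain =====

-- B groups all rows per video_id once and takes max(rows, key=trending_date) per group instead of
-- A's running-max dict of best rows; same cost, a different decomposition (objective: alternative).

-- row["k"]: first-match lookup in the row's association list; the "" default is never used under Pre_.
def pvGetS (row : List (String × String)) (k : String) : String :=
  ((PySem.Dict.mk row).get? k).getD ""

-- ===== PORT A =====
def pvCleanStep (clean : PySem.Dict String (List (String × String))) (row : List (String × String)) : PySem.Dict String (List (String × String)) :=
  if !(clean.contains (pvGetS row "video_id")) then clean.insert (pvGetS row "video_id") row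
  else if pvGetS ((clean.get? (pvGetS row "video_id")).getD []) "trending_date" < pvGetS row "trending_date"
       then clean.insert (pvGetS row "video_id") row else clean

-- category_count[category] += 1: the key is present in this branch, so getD's 0 default is never used
def pvCountStepA (cc : PySem.Dict String Int) (cat : String) : PySem.Dict String Int :=
  if !(cc.contains cat) then cc.insert cat 1 else cc.insert cat (cc.getD cat 0 + 1)

def unique_categories (data : List (List (String × String))) : List (String × Int) :=
  let clean := (data.foldl pvCleanStep PySem.Dict.empty).values
  (clean.foldl (fun cc row => pvCountStepA cc (pvGetS row "category_id")) PySem.Dict.empty).items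

-- ===== PORT B =====
-- groups.setdefault(vid, []).append(row): in-place append to the list stored under vid
def pvGroupStep (g : PySem.Dict String (List (List (String × String)))) (row : List (String × String)) : PySem.Dict String (List (List (String × String))) :=
  g.modify (pvGetS row "video_id") [] (· ++ [row])

-- max(rows, key=lambda r: r["trending_date"]); the [] default is never hit: every group is nonempty
def pvBest (rows : List (List (String × String))) : List (String × String) :=
  (PySem.List.max? rows (fun r => pvGetS r "trending_date")).getD []

def unique_categories_alt (data : List (List (String × String))) : List (String × Int) :=
  let groups := data.foldl pvGroupStep PySem.Dict.empty
  (groups.values.foldl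
    (fun cc rows =>
      cc.insert (pvGetS (pvBest rows) "category_id")
        (cc.getD (pvGetS (pvBest rows) "category_id") 0 + 1))
    PySem.Dict.empty).items

-- ===== PRECONDITION & SPEC =====
-- Pre_ requires every row to carry the keys "video_id", "trending_date" and "category_id": on rows
-- missing one of them the Pythons raise KeyError (A whenever the missing key is read, e.g. always for
-- "video_id"; B may also raise where A happens not to read the key of a shadowed row — see cites).
def Pre_unique_categories (data : List (List (String × String))) : Prop :=
  ∀ row ∈ data, (PySem.Dict.mk row).contains "video_id" = true ∧
    (PySem.Dict.mk row).contains "trending_date" = true ∧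
    (PySem.Dict.mk row).contains "category_id" = true
instance (data : List (List (String × String))) : Decidable (Pre_unique_categories data) := by unfold Pre_unique_categories; infer_instance

def pvWitness_unique_categories : (List (List (String × String))) :=
  [[("video_id", "a"), ("trending_date", "1"), ("category_id", "c")],
   [("video_id", "a"), ("trending_date", "2"), ("category_id", "d")]]

def Spec_unique_categories (data : List (List (String × String))) (out : List (String × Int)) : Prop := out = unique_categories_alt data
instance (data : List (List (String × String))) (out : List (String × Int)) : Decidable (Spec_unique_categories data out) := by unfold Spec_unique_categories; infer_instance

-- ===== CLAIM (what is proved, stated in full; the proofs are below) =====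
def Claim_equal_unique_categories : Prop := ∀ (data : List (List (String × String))), Dom_unique_categories data → Pre_unique_categories data → Spec_unique_categories data (unique_categories data)

-- ===== LEMMAS AND PROOFS =====

-- the key of a trending_date-extremal row, used to state pvBest as a fold step
abbrev pvDate (r : List (String × String)) : String := pvGetS r "trending_date"

-- invariant tying A's best-row dict to B's group dict after the same prefix of data
def pvInv (g : PySem.Dict String (List (List (String × String)))) (clean : PySem.Dict String (List (String × String))) : Prop :=
  clean.items = g.items.map (fun p => (p.1, pvBest p.2)) ∧
  (∀ p ∈ g.items, p.2 ≠ []) ∧ g.keys.Nodup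

lemma pvMax_append (rows : List (List (String × String))) (x m : List (String × String))
    (h : PySem.List.max? rows pvDate = some m) :
    PySem.List.max? (rows ++ [x]) pvDate = if pvDate m < pvDate x then some x else some m := by
  simp only [PySem.List.max?] at h ⊢
  rw [List.foldl_append, h]
  simp

lemma pvBest_singleton (x : List (String × String)) : pvBest [x] = x := by
  simp [pvBest, PySem.List.max?]

lemma pvContains_of_inv {g : PySem.Dict String (List (List (String × String)))}
    {clean : PySem.Dict String (List (String × String))}
    (h : clean.items = g.items.map (fun p => (p.1, pvBest p.2))) (k : String) :
    clean.contains k = g.contains k := by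
  simp only [PySem.Dict.contains, h, List.any_map]
  rfl

lemma pvGet?_of_inv {g : PySem.Dict String (List (List (String × String)))}
    {clean : PySem.Dict String (List (String × String))}
    (h : clean.items = g.items.map (fun p => (p.1, pvBest p.2))) (k : String) :
    clean.get? k = (g.get? k).map pvBest := by
  simp only [PySem.Dict.get?, h, List.find?_map, Option.map_map]
  rfl

lemma pvSnd_eq_of_mem {g : PySem.Dict String (List (List (String × String)))}
    {p : String × List (List (String × String))} {l : List (List (String × String))}
    (hnd : g.keys.Nodup) (hmem : p ∈ g.items) (hget : g.get? p.1 = some l) : p.2 = l := by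
  have := PySem.Dict.get?_of_mem_items g (k := p.1) (v := p.2) (by exact hmem) hnd
  rw [hget] at this
  exact (Option.some_inj.mp this).symm

lemma pvInv_step (g : PySem.Dict String (List (List (String × String))))
    (clean : PySem.Dict String (List (String × String))) (row : List (String × String))
    (h : pvInv g clean) : pvInv (pvGroupStep g row) (pvCleanStep clean row) := by
  obtain ⟨h1, h2, h3⟩ := h
  have hc : clean.contains (pvGetS row "video_id") = g.contains (pvGetS row "video_id") :=
    pvContains_of_inv h1 _
  by_cases hg : g.contains (pvGetS row "video_id") = true
  · -- vid already grouped: both dicts update in place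
    have hgs : (g.get? (pvGetS row "video_id")).isSome := by
      rw [← PySem.Dict.contains_eq_isSome_get?]; exact hg
    obtain ⟨l, hl⟩ := Option.isSome_iff_exists.mp hgs
    have hcl : clean.get? (pvGetS row "video_id") = some (pvBest l) := by
      rw [pvGet?_of_inv h1, hl]; rfl
    have hmeml : (pvGetS row "video_id", l) ∈ g.items := PySem.Dict.mem_items_of_get?_eq_some _ hl
    have hlne : l ≠ [] := h2 _ hmeml
    have hmax : PySem.List.max? l pvDate = some (pvBest l) := by
      cases hx : PySem.List.max? l pvDate with
      | none => exact absurd ((PySem.List.max?_eq_none_iff l pvDate).mp hx) hlne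
      | some m => simp [pvBest, hx]
    have hgstep : pvGroupStep g row = g.insert (pvGetS row "video_id") (l ++ [row]) := by
      simp [pvGroupStep, PySem.Dict.modify, PySem.Dict.getD_eq_get?_getD, hl]
    have hbest_app : pvBest (l ++ [row]) =
        (if pvDate (pvBest l) < pvDate row then row else pvBest l) := by
      rw [pvBest, pvMax_append l row (pvBest l) hmax]
      by_cases hlt : pvDate (pvBest l) < pvDate row <;> simp [hlt]
    have hitems :
        (pvCleanStep clean row).items = (pvGroupStep g row).items.map (fun p => (p.1, pvBest p.2)) := by
      rw [hgstep, PySem.Dict.items_insert_of_contains _ _ hg]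
      unfold pvCleanStep
      rw [hc, if_neg (by simp [hg]), hcl]
      simp only [Option.getD_some]
      by_cases hlt : pvGetS (pvBest l) "trending_date" < pvGetS row "trending_date"
      · rw [if_pos hlt, PySem.Dict.items_insert_of_contains _ _ (hc.trans hg),
          h1, List.map_map, List.map_map]
        apply List.map_congr_left
        intro p hp
        by_cases hpk : p.1 = pvGetS row "video_id"
        · have hp2 : p.2 = l := pvSnd_eq_of_mem h3 hp (hpk ▸ hl)
          simp only [Function.comp, hpk, hp2, beq_self_eq_true, if_true]
          rw [hbest_app, if_pos (by simpa [pvDate, hp2] using hlt)]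
        · simp [Function.comp, hpk]
      · rw [if_neg hlt, h1, List.map_map]
        apply List.map_congr_left
        intro p hp
        by_cases hpk : p.1 = pvGetS row "video_id"
        · have hp2 : p.2 = l := pvSnd_eq_of_mem h3 hp (hpk ▸ hl)
          simp only [Function.comp, hpk, hp2, beq_self_eq_true, if_true]
          rw [hbest_app, if_neg (by simpa [pvDate, hp2] using hlt)]
        · simp [Function.comp, hpk]
    refine ⟨hitems, ?_, ?_⟩
    · intro p hp
      rw [hgstep, PySem.Dict.items_insert_of_contains _ _ hg] at hp
      obtain ⟨q, hq, rfl⟩ := List.mem_map.mp hp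
      by_cases hqk : (q.1 == pvGetS row "video_id") = true
      · simp [hqk]
      · simpa [hqk] using h2 q hq
    · rw [hgstep]
      exact PySem.Dict.nodup_keys_insert _ _ _ h3
  · -- fresh vid: both dicts append
    have hg' : g.contains (pvGetS row "video_id") = false := by
      simpa using hg
    have hgstep : pvGroupStep g row = g.insert (pvGetS row "video_id") [row] := by
      simp [pvGroupStep, PySem.Dict.modify, PySem.Dict.getD_of_not_contains _ _ hg']
    have hcstep : pvCleanStep clean row = clean.insert (pvGetS row "video_id") row := by
      unfold pvCleanStep
      simp [hc, hg']
    refine ⟨?_, ?_, ?_⟩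
    · rw [hgstep, hcstep,
        PySem.Dict.items_insert_of_not_contains _ _ (hc.trans hg'),
        PySem.Dict.items_insert_of_not_contains _ _ hg', h1]
      simp [pvBest_singleton]
    · intro p hp
      rw [hgstep, PySem.Dict.items_insert_of_not_contains _ _ hg'] at hp
      rcases List.mem_append.mp hp with hp | hp
      · exact h2 p hp
      · simp at hp; subst hp; simp
    · rw [hgstep]
      exact PySem.Dict.nodup_keys_insert _ _ _ h3

lemma pvInv_foldl (data : List (List (String × String)))
    (g : PySem.Dict String (List (List (String × String))))
    (clean : PySem.Dict String (List (String × String)))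
    (h : pvInv g clean) : pvInv (data.foldl pvGroupStep g) (data.foldl pvCleanStep clean) := by
  induction data generalizing g clean with
  | nil => exact h
  | cons r t ih => exact ih _ _ (pvInv_step _ _ _ h)

lemma pvCountStep_eq (cc : PySem.Dict String Int) (cat : String) :
    pvCountStepA cc cat = cc.insert cat (cc.getD cat 0 + 1) := by
  unfold pvCountStepA
  by_cases h : cc.contains cat = true
  · simp [h]
  · have h' : cc.contains cat = false := by simpa using h
    rw [PySem.Dict.getD_of_not_contains _ _ h']
    simp [h']

-- ===== VERDICT (by name: the statement is the Claim_ definition above) =====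
theorem unique_categories_spec : Claim_equal_unique_categories := by
  intro data _ _
  unfold Spec_unique_categories
  have hinv := pvInv_foldl data PySem.Dict.empty PySem.Dict.empty
    ⟨by simp [PySem.Dict.empty], by simp [PySem.Dict.empty],
      PySem.Dict.nodup_keys_empty⟩
  obtain ⟨h1, _, _⟩ := hinv
  have hv : (data.foldl pvCleanStep PySem.Dict.empty).values =
      ((data.foldl pvGroupStep PySem.Dict.empty).values).map pvBest := by
    simp only [PySem.Dict.values, h1, List.map_map]
    rfl
  show (((data.foldl pvCleanStep PySem.Dict.empty).values.foldl
      (fun cc row => pvCountStepA cc (pvGetS row "category_id")) PySem.Dict.empty).items) =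
    (((data.foldl pvGroupStep PySem.Dict.empty).values.foldl
      (fun cc rows =>
        cc.insert (pvGetS (pvBest rows) "category_id")
          (cc.getD (pvGetS (pvBest rows) "category_id") 0 + 1)) PySem.Dict.empty).items)
  rw [hv, List.foldl_map]
  have hstep : (fun (cc : PySem.Dict String Int) (rows : List (List (String × String))) =>
        pvCountStepA cc (pvGetS (pvBest rows) "category_id")) =
      (fun cc rows =>
        cc.insert (pvGetS (pvBest rows) "category_id")
          (cc.getD (pvGetS (pvBest rows) "category_id") 0 + 1)) := by
    funext cc rows
    exact pvCountStep_eq cc (pvGetS (pvBest rows) "category_id")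
  rw [hstep]
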